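-- pv_equiv track=rewrite | github.com/Artasel/Zadachi_Python | Home2.py | string_work_2
-- ===== SOURCE A (Python) =====
-- def string_work_2(text: str):
--     check = False
--     number = ''
--
--     for i in range(len(text)):
--         if not text[i].isdigit():
--             check = True
--         if text[i].isdigit() and check:
--             number += text[i]
--     return int(number)
-- ===== SOURCE B (Python) =====
-- def string_work_2(text: str):
--     # Loop-free pipeline: the answer is ALL digits of text with the leading
--     # digit run removed (digits before/at the first non-digit are exactly that run).
--     stripped = text.lstrip('0123456789')
--     if not stripped:
--         return int('')  # no non-digit anywhere: ValueError, as in A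
--     run = len(text) - len(stripped)
--     digs = [c for c in text if c.isdigit()]
--     return int(''.join(digs[run:]))
-- ===== Notes on version B (the rewrite author's own statement) =====
-- stated objective: alternative
-- what changed: Replaces A's stateful flag-carrying pass with a loop-free pipeline based on a different identity: lstrip the leading digit run, collect ALL digits of the whole string, and drop run-many of them before parsing.
import Mathlib
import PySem

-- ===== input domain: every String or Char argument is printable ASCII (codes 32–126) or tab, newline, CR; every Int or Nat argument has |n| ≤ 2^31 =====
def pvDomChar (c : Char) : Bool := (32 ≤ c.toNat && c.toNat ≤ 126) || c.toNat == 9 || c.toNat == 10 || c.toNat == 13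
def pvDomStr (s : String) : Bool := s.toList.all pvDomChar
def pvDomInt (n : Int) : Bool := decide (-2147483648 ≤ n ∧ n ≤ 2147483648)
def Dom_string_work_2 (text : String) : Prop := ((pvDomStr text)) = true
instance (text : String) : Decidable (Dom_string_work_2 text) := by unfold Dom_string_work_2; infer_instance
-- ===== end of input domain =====

-- B replaces A's flag-carrying pass by a loop-free pipeline: lstrip the leading digit run,
-- collect all digits of the whole string, drop run-many of them, parse.

-- ===== PORT A =====
-- the loop body of A: update the flag, then maybe append the digit
def pvStepA (st : Bool × List Char) (c : Char) : Bool × List Char :=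
  let check := if !(PySem.Chars.isdigit c) then true else st.1
  let number := if PySem.Chars.isdigit c && check then st.2 ++ [c] else st.2
  (check, number)

def string_work_2 (text : String) : Int :=
  let st := text.toList.foldl pvStepA (false, [])
  (PySem.Int.ofChars? st.2).getD 0   -- int(number); none = ValueError, excluded by Pre_

-- ===== PORT B =====
-- port of Python's `c in '0123456789'` used by lstrip('0123456789'); exact: that set is this ASCII range
def pvIsDigitSet (c : Char) : Bool := decide ('0' ≤ c) && decide (c ≤ '9')

def string_work_2_alt (text : String) : Int :=
  let cs := text.toList
  let stripped := cs.dropWhile pvIsDigitSet          -- text.lstrip('0123456789')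
  if stripped.length = 0 then 0                      -- Python: int('') = ValueError here, excluded by Pre_
  else
    let run := cs.length - stripped.length
    let digs := cs.filter (fun c => PySem.Chars.isdigit c)
    (PySem.Int.ofChars? (PySem.List.slice digs (some (run : Int)) none)).getD 0
                                                     -- int(''.join(digs[run:])); none = ValueError, excluded by Pre_

-- ===== PRECONDITION & SPEC =====
-- Pre_ excludes exactly the inputs where int() gets an empty string and Python raises ValueError
-- (in both A and B): texts with no non-digit character, or with no digit after the first non-digit.
def Pre_string_work_2 (text : String) : Prop :=
  ((text.toList.dropWhile (fun c => PySem.Chars.isdigit c)).drop 1).any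
    (fun c => PySem.Chars.isdigit c) = true
instance (text : String) : Decidable (Pre_string_work_2 text) := by
  unfold Pre_string_work_2; infer_instance
def pvWitness_string_work_2 : String := "a12"

def Spec_string_work_2 (text : String) (out : Int) : Prop := out = string_work_2_alt text
instance (text : String) (out : Int) : Decidable (Spec_string_work_2 text out) := by
  unfold Spec_string_work_2; infer_instance

-- ===== CLAIM (what is proved, stated in full; the proofs are below) =====
def Claim_equal_string_work_2 : Prop := ∀ (text : String), Dom_string_work_2 text → Pre_string_work_2 text → Spec_string_work_2 text (string_work_2 text)

-- ===== LEMMAS AND PROOFS =====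

-- the char-set test of B's lstrip is exactly isdigit
lemma pvIsDigitSet_eq : pvIsDigitSet = (fun c => PySem.Chars.isdigit c) := rfl

-- once the flag is set, A's loop appends exactly the digits
lemma foldl_stepA_true (l : List Char) (acc : List Char) :
    l.foldl pvStepA (true, acc) = (true, acc ++ l.filter (fun c => PySem.Chars.isdigit c)) := by
  induction l generalizing acc with
  | nil => simp
  | cons c l ih =>
    by_cases h : PySem.Chars.isdigit c = true <;>
      simp [pvStepA, h, ih]

-- A's loop result, characterised by the first non-digit
lemma foldl_stepA_false (l : List Char) :
    l.foldl pvStepA (false, []) =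
      match l.dropWhile (fun c => PySem.Chars.isdigit c) with
      | [] => (false, [])
      | _ :: rest => (true, rest.filter (fun c => PySem.Chars.isdigit c)) := by
  induction l with
  | nil => simp
  | cons c l ih =>
    by_cases h : PySem.Chars.isdigit c = true
    · simpa [pvStepA, h, List.dropWhile_cons, List.foldl_cons] using ih
    · simp [pvStepA, h, foldl_stepA_true]

-- the head of a non-empty dropWhile fails the predicate
lemma dropWhile_head_false {p : Char → Bool} {l : List Char} {c : Char} {rest : List Char}
    (h : l.dropWhile p = c :: rest) : p c = false := by
  induction l with
  | nil => simp at h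
  | cons a l ih =>
    by_cases ha : p a = true
    · exact ih (by simpa [List.dropWhile_cons, ha] using h)
    · rw [List.dropWhile_cons] at h
      simp [ha] at h
      simpa [← h.1] using ha

-- B's identity: all digits of l, with the leading digit run dropped,
-- are exactly the digits after the first non-digit
lemma filter_drop_takeWhile (l : List Char) (c : Char) (rest : List Char)
    (h : l.dropWhile (fun c => PySem.Chars.isdigit c) = c :: rest) :
    (l.filter (fun c => PySem.Chars.isdigit c)).drop
        (l.takeWhile (fun c => PySem.Chars.isdigit c)).length
      = rest.filter (fun c => PySem.Chars.isdigit c) := by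
  have hc : PySem.Chars.isdigit c = false := dropWhile_head_false h
  have hsplit : l = l.takeWhile (fun c => PySem.Chars.isdigit c) ++ (c :: rest) := by
    conv_lhs => rw [← List.takeWhile_append_dropWhile
      (p := fun c => PySem.Chars.isdigit c) (l := l)]
    rw [h]
  have htw : (l.takeWhile (fun c => PySem.Chars.isdigit c)).filter
      (fun c => PySem.Chars.isdigit c) = l.takeWhile (fun c => PySem.Chars.isdigit c) :=
    List.filter_eq_self.2 (fun a ha => List.mem_takeWhile_imp ha)
  have hfil : l.filter (fun c => PySem.Chars.isdigit c)
      = l.takeWhile (fun c => PySem.Chars.isdigit c)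
        ++ rest.filter (fun c => PySem.Chars.isdigit c) := by
    conv_lhs => rw [hsplit]
    rw [List.filter_append, List.filter_cons, htw]
    simp [hc]
  rw [hfil, List.drop_left]

-- ===== VERDICT (by name: the statement is the Claim_ definition above) =====
theorem string_work_2_spec : Claim_equal_string_work_2 := by
  intro text _ hpre
  unfold Spec_string_work_2 string_work_2 string_work_2_alt
  rw [pvIsDigitSet_eq, foldl_stepA_false]
  cases h : text.toList.dropWhile (fun c => PySem.Chars.isdigit c) with
  | nil => unfold Pre_string_work_2 at hpre; rw [h] at hpre; simp at hpre
  | cons c rest =>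
    have hlen : text.toList.length - (rest.length + 1)
        = (text.toList.takeWhile (fun c => PySem.Chars.isdigit c)).length := by
      have := List.takeWhile_append_dropWhile
        (p := fun c => PySem.Chars.isdigit c) (l := text.toList)
      have hl : (text.toList.takeWhile (fun c => PySem.Chars.isdigit c)).length
          + (c :: rest).length = text.toList.length := by
        rw [← h, ← List.length_append, this]
      simp only [List.length_cons] at hl
      omega
    simp only [h, List.length_cons]
    rw [if_neg (by simp), hlen, PySem.List.slice_from]
    simp only [Int.toNat_natCast]
    rw [filter_drop_takeWhile text.toList c rest h]
    exact Int.natCast_nonneg _
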